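-- pv_equiv track=rewrite | github.com/FreeRiverHouse/Onde | scripts/analyze-streak-position.py | analyze_streak_continuation
-- ===== SOURCE A (Python) =====
-- from collections import defaultdict
--
-- def analyze_streak_continuation(trades):
--     """
--     Analyze probability of streak continuing vs breaking.
--     E.g., after 2 wins, how often does the 3rd trade win?
--     """
--     if not trades:
--         return {}
--
--     continuation_stats = defaultdict(lambda: {'continues': 0, 'breaks': 0})
--
--     current_streak = 0
--
--     for trade in trades:
--         won = trade['result_status'] == 'won'
--
--         # Check if this trade continues or breaks streak
--         if current_streak > 0:  # On win streak
--             streak_len = min(current_streak, 5)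
--             key = f"win_streak_{streak_len}"
--             if won:
--                 continuation_stats[key]['continues'] += 1
--             else:
--                 continuation_stats[key]['breaks'] += 1
--         elif current_streak < 0:  # On loss streak
--             streak_len = min(abs(current_streak), 5)
--             key = f"loss_streak_{streak_len}"
--             if not won:  # Loss continues loss streak
--                 continuation_stats[key]['continues'] += 1
--             else:
--                 continuation_stats[key]['breaks'] += 1
--
--         # Update streak
--         if won:
--             current_streak = current_streak + 1 if current_streak > 0 else 1
--         else:
--             current_streak = current_streak - 1 if current_streak < 0 else -1
--
--     return continuation_stats
-- ===== SOURCE B (Python) =====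
-- from collections import defaultdict
--
-- def analyze_streak_continuation(trades):
--     """Run-length decomposition: group trades into maximal win/loss runs, then
--     count continues inside each run and breaks at run boundaries."""
--     results = [t['result_status'] == 'won' for t in trades]
--     stats = defaultdict(lambda: {'continues': 0, 'breaks': 0})
--     prev = None
--     for w, length in _runs(results):
--         if prev is not None:
--             pw, pl = prev
--             stats[_key(pw, min(pl, 5))]['breaks'] += 1
--         for p in range(1, length):
--             stats[_key(w, min(p, 5))]['continues'] += 1
--         prev = (w, length)
--     return stats
--
-- def _key(w, n):
--     return ('win_streak_' if w else 'loss_streak_') + str(n)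
--
-- def _runs(results):
--     if not results:
--         return []
--     w, rest = results[0], results[1:]
--     i = 0
--     while i < len(rest) and rest[i] == w:
--         i += 1
--     return [(w, 1 + i)] + _runs(rest[i:])
-- ===== Notes on version B (the rewrite author's own statement) =====
-- stated objective: alternative
-- what changed: Replaces A's per-trade signed-streak state machine with a two-phase run-length decomposition: trades are grouped into maximal win/loss runs, then 'continues' are counted from within-run positions and 'breaks' from run boundaries.
import Mathlib
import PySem

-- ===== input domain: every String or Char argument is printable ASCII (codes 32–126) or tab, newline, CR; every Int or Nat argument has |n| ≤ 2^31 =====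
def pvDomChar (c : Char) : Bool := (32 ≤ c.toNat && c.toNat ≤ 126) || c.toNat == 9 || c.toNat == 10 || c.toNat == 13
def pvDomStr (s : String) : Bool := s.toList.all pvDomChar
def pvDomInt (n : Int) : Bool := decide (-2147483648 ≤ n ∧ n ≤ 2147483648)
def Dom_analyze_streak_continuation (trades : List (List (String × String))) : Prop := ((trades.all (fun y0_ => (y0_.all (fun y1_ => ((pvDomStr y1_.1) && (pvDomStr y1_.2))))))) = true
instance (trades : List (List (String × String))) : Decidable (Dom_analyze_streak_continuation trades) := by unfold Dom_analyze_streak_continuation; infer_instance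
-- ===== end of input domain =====

-- B replaces A's per-trade signed-streak state machine by a two-phase run-length decomposition
-- (group into maximal win/loss runs, then count continues inside runs and breaks at run boundaries);
-- same O(n) cost, alternative structure.

-- ===== PORT A =====
-- shared primitive: `stats[key][fld] += 1` on a defaultdict(lambda: {'continues': 0, 'breaks': 0})
def pvInc (d : PySem.Dict String (PySem.Dict String Int)) (key fld : String) :
    PySem.Dict String (PySem.Dict String Int) :=
  d.modify key (PySem.Dict.mk [("continues", 0), ("breaks", 0)]) (fun m => m.modify fld 0 (· + 1))

-- shared primitive: trade['result_status'] == 'won' (Pre_ guarantees the key is present)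
def pvWon (trade : List (String × String)) : Bool :=
  (trade.lookup "result_status").getD "" == "won"

-- the body of A's for-loop, on the state (continuation_stats, current_streak)
def pvStepA (st : PySem.Dict String (PySem.Dict String Int) × Int) (won : Bool) :
    PySem.Dict String (PySem.Dict String Int) × Int :=
  let d := st.1
  let cs := st.2
  let d' :=
    if cs > 0 then
      let key := "win_streak_" ++ PySem.Int.toStr (min cs 5)
      if won then pvInc d key "continues" else pvInc d key "breaks"
    else if cs < 0 then
      let key := "loss_streak_" ++ PySem.Int.toStr (min |cs| 5)
      if !won then pvInc d key "continues" else pvInc d key "breaks"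
    else d
  let cs' := if won then (if cs > 0 then cs + 1 else 1) else (if cs < 0 then cs - 1 else -1)
  (d', cs')

def analyze_streak_continuation (trades : List (List (String × String))) :
    List (String × List (String × Int)) :=
  if trades = [] then []
  else
    let r := trades.foldl (fun st trade => pvStepA st (pvWon trade)) (PySem.Dict.empty, (0 : Int))
    r.1.items.map (fun p => (p.1, p.2.items))

-- ===== PORT B =====
def pvKey (w : Bool) (n : Int) : String :=
  (if w then "win_streak_" else "loss_streak_") ++ PySem.Int.toStr n

-- _runs: maximal runs of equal results, as (result, length) pairs
def pvRuns : List Bool → List (Bool × Int)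
  | [] => []
  | w :: rest =>
      let g := (rest.takeWhile (· == w)).length
      (w, 1 + (g : Int)) :: pvRuns (rest.drop g)
  termination_by l => l.length
  decreasing_by simp

-- the body of B's for-loop over runs, on the state (stats, prev)
def pvStepB (st : PySem.Dict String (PySem.Dict String Int) × Option (Bool × Int))
    (run : Bool × Int) :
    PySem.Dict String (PySem.Dict String Int) × Option (Bool × Int) :=
  let d1 := match st.2 with
    | some (pw, pl) => pvInc st.1 (pvKey pw (min pl 5)) "breaks"
    | none => st.1
  let d2 := (PySem.List.pyRange 1 run.2 1).foldl
      (fun d p => pvInc d (pvKey run.1 (min p 5)) "continues") d1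
  (d2, some run)

def analyze_streak_continuation_alt (trades : List (List (String × String))) :
    List (String × List (String × Int)) :=
  let results := trades.map pvWon
  let r := (pvRuns results).foldl pvStepB (PySem.Dict.empty, none)
  r.1.items.map (fun p => (p.1, p.2.items))

-- ===== PRECONDITION & SPEC =====
-- Pre_ excludes exactly the trades lacking the key 'result_status', on which Python A raises KeyError.
def Pre_analyze_streak_continuation (trades : List (List (String × String))) : Prop :=
  ∀ t ∈ trades, "result_status" ∈ t.map Prod.fst
instance (trades : List (List (String × String))) : Decidable (Pre_analyze_streak_continuation trades) := by unfold Pre_analyze_streak_continuation; infer_instance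
def pvWitness_analyze_streak_continuation : (List (List (String × String))) :=
  [[("result_status", "won")], [("result_status", "lost")]]

def Spec_analyze_streak_continuation (trades : List (List (String × String))) (out : List (String × List (String × Int))) : Prop := out = analyze_streak_continuation_alt trades
instance (trades : List (List (String × String))) (out : List (String × List (String × Int))) : Decidable (Spec_analyze_streak_continuation trades out) := by unfold Spec_analyze_streak_continuation; infer_instance

-- ===== CLAIM (what is proved, stated in full; the proofs are below) =====
def Claim_equal_analyze_streak_continuation : Prop := ∀ (trades : List (List (String × String))), Dom_analyze_streak_continuation trades → Pre_analyze_streak_continuation trades → Spec_analyze_streak_continuation trades (analyze_streak_continuation trades)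

-- ===== LEMMAS AND PROOFS =====

-- encode B's `prev` as A's signed streak counter
def pvEnc : Option (Bool × Int) → Int
  | none => 0
  | some (w, l) => if w then l else -l

-- invariant: prev holds a positive run length whose result differs from the next trade
def pvGood : Option (Bool × Int) → List Bool → Prop
  | none, _ => True
  | some (w, l), bs => 1 ≤ l ∧ ∀ b, bs.head? = some b → b ≠ w

-- the continues accumulated inside one run, positions k, k+1, …, k+m-1
def pvContFold (w : Bool) (d : PySem.Dict String (PySem.Dict String Int)) (k : Int) :
    Nat → PySem.Dict String (PySem.Dict String Int)
  | 0 => d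
  | Nat.succ m => pvContFold w (pvInc d (pvKey w (min k 5)) "continues") (k + 1) m

theorem pvContFold_pyRange (w : Bool) : ∀ (m : Nat) (k : Int) d,
    (PySem.List.pyRange k (k + m) 1).foldl
      (fun d p => pvInc d (pvKey w (min p 5)) "continues") d = pvContFold w d k m := by
  intro m
  induction m with
  | zero => intro k d; simp [pvContFold]
  | succ m ih =>
      intro k d
      have hc : (((m + 1 : Nat)) : Int) = (m : Int) + 1 := by push_cast; ring
      rw [hc, PySem.List.pyRange_one_cons (by omega), List.foldl_cons,
        show k + ((m : Int) + 1) = (k + 1) + (m : Int) by ring]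
      conv_rhs => rw [pvContFold]
      exact ih (k + 1) _

theorem pvStepA_run (w : Bool) : ∀ (m : Nat) (k : Int) d, 1 ≤ k →
    List.foldl pvStepA (d, pvEnc (some (w, k))) (List.replicate m w) =
      (pvContFold w d k m, pvEnc (some (w, k + m))) := by
  intro m
  induction m with
  | zero => intro k d _; simp [List.replicate, pvContFold]
  | succ m ih =>
      intro k d hk
      rw [List.replicate_succ, List.foldl_cons]
      have hstep : pvStepA (d, pvEnc (some (w, k))) w =
          (pvInc d (pvKey w (min k 5)) "continues", pvEnc (some (w, k + 1))) := by
        cases w with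
        | true => simp [pvStepA, pvEnc, pvKey]; omega
        | false =>
            simp [pvStepA, pvEnc, pvKey, show ¬ (k : Int) < 0 by omega,
              show (0 : Int) < k by omega, abs_of_pos (show (0 : Int) < k by omega)]
            omega
      rw [hstep, ih (k + 1) _ (by omega),
        show (k : Int) + 1 + (m : Int) = k + ((m + 1 : Nat) : Int) by push_cast; ring]
      conv_rhs => rw [pvContFold]

-- splitting off the maximal leading run
theorem pvSplit (w : Bool) : ∀ (l : List Bool),
    l.takeWhile (· == w) = List.replicate (l.takeWhile (· == w)).length w ∧
    l = l.takeWhile (· == w) ++ l.drop (l.takeWhile (· == w)).length ∧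
    (∀ b, (l.drop (l.takeWhile (· == w)).length).head? = some b → b ≠ w) := by
  intro l
  induction l with
  | nil => simp
  | cons a rest ih =>
      by_cases ha : a = w
      · subst ha
        simpa [List.replicate_succ] using ih
      · simp [ha]

theorem pvMain : ∀ (n : Nat) (bs : List Bool), bs.length ≤ n →
    ∀ (d : PySem.Dict String (PySem.Dict String Int)) (prev : Option (Bool × Int)),
    pvGood prev bs →
    List.foldl pvStepA (d, pvEnc prev) bs =
      (((pvRuns bs).foldl pvStepB (d, prev)).1, pvEnc ((pvRuns bs).foldl pvStepB (d, prev)).2) := by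
  intro n
  induction n with
  | zero =>
      intro bs hlen d prev _
      have : bs = [] := List.length_eq_zero_iff.mp (by omega)
      subst this; simp [pvRuns]
  | succ n ih =>
      intro bs hlen d prev hgood
      cases bs with
      | nil => simp [pvRuns]
      | cons w rest =>
          obtain ⟨hrep, hsplit, hhead⟩ := pvSplit w rest
          set g := (rest.takeWhile (· == w)).length with hg
          -- first trade of the run: possible break, streak resets to ±1
          have hfirst : pvStepA (d, pvEnc prev) w =
              (match prev with
                | some (pw, pl) => pvInc d (pvKey pw (min pl 5)) "breaks"
                | none => d, pvEnc (some (w, 1))) := by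
            cases prev with
            | none => cases w <;> simp [pvStepA, pvEnc]
            | some p =>
                obtain ⟨pw, pl⟩ := p
                obtain ⟨hpl, hne⟩ := hgood
                have hwp : w ≠ pw := hne w rfl
                cases pw with
                | true =>
                    have hw : w = false := by
                      cases w with
                      | false => rfl
                      | true => exact absurd rfl hwp
                    subst hw
                    simp [pvStepA, pvEnc, pvKey, show (0 : Int) < pl by omega]
                    omega
                | false =>
                    have hw : w = true := by
                      cases w with
                      | true => rfl
                      | false => exact absurd rfl hwp
                    subst hw
                    simp [pvStepA, pvEnc, pvKey, show ¬ pl < 0 by omega,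
                      show (0 : Int) < pl by omega, abs_of_pos (show (0 : Int) < pl by omega)]
          -- A's side: first trade, then the rest of the run, then the remaining trades
          have hA : List.foldl pvStepA (d, pvEnc prev) (w :: rest) =
              List.foldl pvStepA
                (pvContFold w (pvStepA (d, pvEnc prev) w).1 1 g, pvEnc (some (w, 1 + (g : Int))))
                (rest.drop g) := by
            conv_lhs => rw [List.foldl_cons, show rest = rest.takeWhile (· == w) ++ rest.drop g from hsplit]
            rw [List.foldl_append]
            congr 1
            have := pvStepA_run w g 1 (pvStepA (d, pvEnc prev) w).1 (by omega)
            rw [show rest.takeWhile (· == w) = List.replicate g w from hrep]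
            rw [show (pvStepA (d, pvEnc prev) w) = ((pvStepA (d, pvEnc prev) w).1, pvEnc (some (w, 1))) from by rw [hfirst]]
            rw [this]
          -- B's side: one pvStepB step produces exactly the same dictionary
          have hB : pvStepB (d, prev) (w, 1 + (g : Int)) =
              (pvContFold w (pvStepA (d, pvEnc prev) w).1 1 g, some (w, 1 + (g : Int))) := by
            have hpr : (PySem.List.pyRange 1 (1 + (g : Int)) 1).foldl
                (fun d p => pvInc d (pvKey w (min p 5)) "continues") (pvStepA (d, pvEnc prev) w).1 =
                pvContFold w (pvStepA (d, pvEnc prev) w).1 1 g :=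
              pvContFold_pyRange w g 1 (pvStepA (d, pvEnc prev) w).1
            cases prev with
            | none => simpa [pvStepB, hfirst] using hpr
            | some p => obtain ⟨pw, pl⟩ := p; simpa [pvStepB, hfirst] using hpr
          have hlen' : (rest.drop g).length ≤ n := by
            have := List.length_drop (l := rest) (i := g)
            simp at hlen ⊢; omega
          have hgood' : pvGood (some (w, 1 + (g : Int))) (rest.drop g) := by
            exact ⟨by omega, hhead⟩
          rw [hA, ih (rest.drop g) hlen' _ (some (w, 1 + (g : Int))) hgood']
          have hruns : pvRuns (w :: rest) = (w, 1 + (g : Int)) :: pvRuns (rest.drop g) := by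
            rw [pvRuns]
          rw [hruns, List.foldl_cons, hB]

-- ===== VERDICT (by name: the statement is the Claim_ definition above) =====
theorem analyze_streak_continuation_spec : Claim_equal_analyze_streak_continuation := by
  intro trades _ _
  unfold Spec_analyze_streak_continuation
  unfold analyze_streak_continuation analyze_streak_continuation_alt
  have key : List.foldl (fun st trade => pvStepA st (pvWon trade))
      (PySem.Dict.empty, (0 : Int)) trades =
      (((pvRuns (trades.map pvWon)).foldl pvStepB (PySem.Dict.empty, none)).1,
        pvEnc ((pvRuns (trades.map pvWon)).foldl pvStepB (PySem.Dict.empty, none)).2) := by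
    rw [← List.foldl_map]
    exact pvMain (trades.map pvWon).length _ le_rfl _ none trivial
  by_cases h : trades = []
  · subst h
    simp [pvRuns]
    rfl
  · rw [if_neg h, key]
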